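-- pv_equiv track=rewrite | github.com/aostlin/AdventOfCode | 2024/day9/day9.py | create_filled_list
-- ===== SOURCE A (Python) =====
-- def create_filled_list(input_string):
--
--     nr_filled = sum([int(x) for x in input_string[::2]])
--
--     reverse_list_gen = explode_list_reverse(input_string)
--     list_gen = explode_list(input_string)
--
--     exploded_list = []
--     for idx, x in enumerate(input_string):
--         if idx % 2 == 0:
--             for x in range(int(x)):
--                 exploded_list.append(next(list_gen))
--         else:
--             for x in range(int(x)):
--                 exploded_list.append(next(reverse_list_gen))
--         if len(exploded_list) >= nr_filled:
--             break
--
--     remainder = len(exploded_list) - nr_filled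
--     if len(exploded_list) > nr_filled:
--         return exploded_list[:len(exploded_list)-remainder]
--     else:
--         return exploded_list
--
-- def reverse_enumerate(input_list):
--     for idx in range(len(input_list)-1, -1, -1):
--         yield (idx, input_list[idx])
--
-- def explode_list_reverse(input_string):
--    for idx, x in reverse_enumerate(input_string[::2]):
--       for _ in range(int(x)):
--         yield idx
--
-- def explode_list(input_string):
--    for idx, x in enumerate(input_string[::2]):
--       for _ in range(int(x)):
--         yield idx
-- ===== SOURCE B (Python) =====
-- def create_filled_list(input_string):
--     # Two-phase compaction: first lay out a placeholder disk in which file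
--     # blocks hold their file id and free blocks hold None (parsing no further
--     # than needed to cover the file-block total), then run a separate back-fill
--     # pass that overwrites each None in the first nr slots with the next file
--     # block taken from the end of the flat block list.
--     files = [int(c) for c in input_string[::2]]
--     nr = sum(files)
--     blocks = [fid for fid, n in enumerate(files) for _ in range(n)]
--     gaps = input_string[1::2]
--     disk = []
--     fid = 0
--     while len(disk) < nr:
--         disk += [fid] * files[fid]
--         if len(disk) < nr:
--             disk += [None] * int(gaps[fid])
--         fid += 1
--     out = disk[:nr]
--     j = nr - 1
--     for i in range(nr):
--         if out[i] is None:
--             out[i] = blocks[j]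
--             j -= 1
--     return out
-- ===== Notes on version B (the rewrite author's own statement) =====
-- stated objective: alternative
-- what changed: Replaces A's fused single pass that interleaves forward-generator file ids with ids drawn on the fly from a reverse generator (plus a final truncating slice) by a two-phase compaction: first build a placeholder disk with None in the free slots, then a separate back-fill pass over the first nr slots that overwrites each None with the next block taken from the end of the flat block list.
import Mathlib
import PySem

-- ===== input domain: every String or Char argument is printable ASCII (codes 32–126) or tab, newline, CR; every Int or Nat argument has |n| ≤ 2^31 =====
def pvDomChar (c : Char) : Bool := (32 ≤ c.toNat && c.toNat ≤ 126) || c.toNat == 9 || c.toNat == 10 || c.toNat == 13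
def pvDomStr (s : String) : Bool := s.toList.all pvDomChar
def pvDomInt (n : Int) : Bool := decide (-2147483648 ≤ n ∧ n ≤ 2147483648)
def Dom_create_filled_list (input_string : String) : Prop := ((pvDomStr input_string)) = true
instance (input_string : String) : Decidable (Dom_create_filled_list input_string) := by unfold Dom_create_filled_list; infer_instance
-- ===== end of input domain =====

-- B replaces A's fused pass (interleaving forward-generator ids with ids drawn on the
-- fly from a reverse generator, then a truncating slice) by a two-phase compaction:
-- build a placeholder disk with none in the free slots, then a separate back-fill pass
-- over its first nr slots overwriting each none from the end of the flat block list
-- (alternative algorithm, same asymptotic cost; return value only, no mutation).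

-- int(x): exact for the single digit characters, the only ones int() is applied to
-- on the inputs admitted by Pre_create_filled_list.
def pyIntChar (c : Char) : Int := (c.toNat : Int) - 48

-- exact port of l[::2] (step-2 slice of the whole list)
def everyOther {α : Type} : List α → List α
  | [] => []
  | [x] => [x]
  | x :: _ :: xs => x :: everyOther xs

-- ===== PORT A =====

-- explode_list: the full (finite) sequence of values the generator yields
def explodeA (s : String) : List Int :=
  (PySem.List.enumerate (everyOther s.toList) 0).flatMap
    (fun p => List.replicate (pyIntChar p.2).toNat p.1)

-- reverse_enumerate: (idx, l[idx]) for idx in range(len(l)-1, -1, -1); the index is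
-- always in range, so the pyGetD default is never used
def revEnumA (l : List Char) : List (Int × Char) :=
  (PySem.List.pyRange ((l.length : Int) - 1) (-1) (-1)).map
    (fun i => (i, PySem.List.pyGetD l i ' '))

-- explode_list_reverse: the full sequence of values the reverse generator yields
def explodeRevA (s : String) : List Int :=
  (revEnumA (everyOther s.toList)).flatMap
    (fun p => List.replicate (pyIntChar p.2).toNat p.1)

-- the for-loop with its break; a generator is modelled as its yield list plus a cursor
-- (fc into list_gen, rc into reverse_list_gen): 'k calls of next' = the next k entries
-- (on exhaustion Python raises StopIteration — those inputs are outside Pre_)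
def loopA (nr : Int) (fwd rev : List Int) :
    List (Int × Char) → List Int → Nat → Nat → List Int
  | [], acc, _, _ => acc
  | (idx, c) :: rest, acc, fc, rc =>
    if idx % 2 == 0 then
      let k := (pyIntChar c).toNat
      let acc' := acc ++ (fwd.drop fc).take k
      if nr ≤ (acc'.length : Int) then acc'
      else loopA nr fwd rev rest acc' (fc + k) rc
    else
      let k := (pyIntChar c).toNat
      let acc' := acc ++ (rev.drop rc).take k
      if nr ≤ (acc'.length : Int) then acc'
      else loopA nr fwd rev rest acc' fc (rc + k)

def create_filled_list (input_string : String) : List Int :=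
  let cs := input_string.toList
  let nr := ((everyOther cs).map pyIntChar).sum
  let rev := explodeRevA input_string
  let fwd := explodeA input_string
  let ex := loopA nr fwd rev (PySem.List.enumerate cs 0) [] 0 0
  let remainder := (ex.length : Int) - nr
  if nr < (ex.length : Int) then
    PySem.List.slice ex none (some ((ex.length : Int) - remainder))
  else ex

-- ===== PORT B =====

-- blocks = [fid for fid, n in enumerate(files) for _ in range(n)]
def blocksB (files : List Int) : List Int :=
  (PySem.List.enumerate files 0).flatMap (fun p => List.replicate p.2.toNat p.1)

-- the while loop laying out the placeholder disk (file blocks = some id, free = none);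
-- driven by the files list (files[fid] indexing); where Python would raise (files
-- exhausted with len(disk) < nr, int() on a non-digit) the input is outside Pre_
def buildDisk (gaps : List Char) (nr : Int) :
    List Int → Int → List (Option Int) → List (Option Int)
  | [], _, disk => disk
  | n :: rest, fid, disk =>
    if (disk.length : Int) < nr then
      if ((disk ++ List.replicate n.toNat (some fid)).length : Int) < nr then
        buildDisk gaps nr rest (fid + 1)
          ((disk ++ List.replicate n.toNat (some fid)) ++
            List.replicate (pyIntChar (PySem.List.pyGetD gaps fid ' ')).toNat none)
      else buildDisk gaps nr rest (fid + 1) (disk ++ List.replicate n.toNat (some fid))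
    else disk

-- the back-fill pass: for i in range(nr): if out[i] is None: out[i] = blocks[j]; j -= 1
def backFill (blocks : List Int) : List (Option Int) → Int → List Int
  | [], _ => []
  | some x :: rest, j => x :: backFill blocks rest j
  | none :: rest, j => PySem.List.pyGetD blocks j 0 :: backFill blocks rest (j - 1)

def create_filled_list_alt (input_string : String) : List Int :=
  let cs := input_string.toList
  let files := (everyOther cs).map pyIntChar
  let nr := files.sum
  let blocks := blocksB files
  let gaps := everyOther (cs.drop 1)
  let disk := buildDisk gaps nr files 0 []
  backFill blocks (disk.take nr.toNat) (nr - 1)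

-- ===== PRECONDITION & SPEC =====

-- total int() value of the first m characters
def psumP (cs : List Char) (m : Nat) : Int := ((cs.take m).map pyIntChar).sum
-- nr_filled: total int() value of the even-position characters
def nrP (cs : List Char) : Int :=
  ((List.range ((cs.length + 1) / 2)).map (fun k => pyIntChar (cs.getD (2 * k) ' '))).sum
-- total int() value of the first m gap (odd-position) characters
def osumRP (cs : List Char) (m : Nat) : Int :=
  ((List.range m).map (fun k => pyIntChar (cs.getD (2 * k + 1) ' '))).sum

-- Pre_ = exactly the inputs where A returns normally: every even-position character is a
-- digit (all are int()ed up front for nr_filled), and every gap character the loop reaches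
-- before its break (guard: all running totals so far are still below nr) is a digit whose
-- gap does not over-consume the reverse generator (osum ≤ nr, else StopIteration).
def Pre_create_filled_list (input_string : String) : Prop :=
  let cs := input_string.toList
  (∀ i, i < cs.length → i % 2 = 0 →
    48 ≤ (cs.getD i ' ').toNat ∧ (cs.getD i ' ').toNat ≤ 57) ∧
  (∀ fid, fid < cs.length / 2 →
    (∀ j, j < 2 * fid + 1 → psumP cs (j + 1) < nrP cs) →
    (48 ≤ (cs.getD (2 * fid + 1) ' ').toNat ∧ (cs.getD (2 * fid + 1) ' ').toNat ≤ 57) ∧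
      osumRP cs (fid + 1) ≤ nrP cs)
instance (input_string : String) : Decidable (Pre_create_filled_list input_string) := by
  unfold Pre_create_filled_list; infer_instance

def pvWitness_create_filled_list : String := "2333133121414131402"

def Spec_create_filled_list (input_string : String) (out : List Int) : Prop :=
  out = create_filled_list_alt input_string
instance (input_string : String) (out : List Int) : Decidable (Spec_create_filled_list input_string out) := by
  unfold Spec_create_filled_list; infer_instance

-- ===== CLAIM (what is proved, stated in full; the proofs are below) =====
def Claim_equal_create_filled_list : Prop := ∀ (input_string : String), Dom_create_filled_list input_string → Pre_create_filled_list input_string → Spec_create_filled_list input_string (create_filled_list input_string)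

-- ===== LEMMAS AND PROOFS =====

def filesOf (cs : List Char) : List Int := (everyOther cs).map pyIntChar

-- gap characters s[1::2] and take-based prefix sums (proof-side views of nrP/osumRP)
def gsP (cs : List Char) : List Char := everyOther (cs.drop 1)
def osumP (cs : List Char) (m : Nat) : Int := (((gsP cs).take m).map pyIntChar).sum

def blocksFrom (fs : List Int) (s : Int) : List Int :=
  (PySem.List.enumerate fs s).flatMap (fun p => List.replicate p.2.toNat p.1)

-- number of none entries (the free slots) of a placeholder disk
def noneCount : List (Option Int) → Nat
  | [] => 0
  | none :: r => noneCount r + 1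
  | some _ :: r => noneCount r

-- the remainder/slice tail of port A
def truncA (nr : Int) (ex : List Int) : List Int :=
  if nr < (ex.length : Int) then
    PySem.List.slice ex none (some ((ex.length : Int) - ((ex.length : Int) - nr)))
  else ex

theorem ball_of_getD {α : Type} {l : List α} {P : α → Prop} (d : α)
    (h : ∀ i, i < l.length → P (l.getD i d)) : ∀ c ∈ l, P c := by
  intro c hc
  obtain ⟨i, hi, rfl⟩ := List.mem_iff_getElem.mp hc
  have := h i hi
  rwa [List.getD_eq_getElem l d hi] at this

theorem twoStepInd {α : Type} {P : List α → Prop} (h0 : P []) (h1 : ∀ a, P [a])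
    (h2 : ∀ a b l, P l → P (a :: b :: l)) : ∀ l, P l
  | [] => h0
  | [a] => h1 a
  | a :: b :: l => h2 a b l (twoStepInd h0 h1 h2 l)

theorem everyOther_cons_eq {α : Type} (x : α) (l : List α) :
    everyOther (x :: l) = x :: everyOther (l.drop 1) := by
  cases l with
  | nil => rfl
  | cons y ys => rfl

theorem everyOther_drop2 {α : Type} (l : List α) : everyOther (l.drop 2) = (everyOther l).drop 1 := by
  match l with
  | [] => rfl
  | [a] => rfl
  | a :: b :: r => rfl

theorem everyOther_drop {α : Type} (k : Nat) : ∀ (l : List α),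
    everyOther (l.drop (2 * k)) = (everyOther l).drop k := by
  induction k with
  | zero => intro l; simp
  | succ k ih =>
    intro l
    have h1 : l.drop (2 * (k + 1)) = (l.drop 2).drop (2 * k) := by
      rw [List.drop_drop]; ring_nf
    rw [h1, ih, everyOther_drop2, List.drop_drop]
    congr 1
    omega

theorem filesOf_drop (cs : List Char) (k : Nat) :
    (filesOf cs).drop k = (everyOther (cs.drop (2 * k))).map pyIntChar := by
  rw [filesOf, ← List.map_drop, everyOther_drop]

theorem gsP_drop (cs : List Char) (k : Nat) :
    (gsP cs).drop k = everyOther (cs.drop (2 * k + 1)) := by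
  rw [gsP, ← everyOther_drop, List.drop_drop]
  ring_nf

theorem getD_of_drop {α : Type} {l : List α} {n : Nat} {x : α} {xs : List α} (d : α)
    (h : l.drop n = x :: xs) : l.getD n d = x := by
  have h1 : l[n]? = some x := by
    rw [← List.head?_drop, h]; rfl
  simp [List.getD_eq_getElem?_getD, h1]

theorem lt_length_of_drop {α : Type} {l : List α} {n : Nat} {x : α} {xs : List α}
    (h : l.drop n = x :: xs) : n < l.length := by
  have h1 := congrArg List.length h
  simp only [List.length_drop, List.length_cons] at h1
  omega

theorem sum_take_succ (l : List Char) (m : Nat) (x : Char) (xs : List Char)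
    (h : l.drop m = x :: xs) :
    ((l.take (m + 1)).map pyIntChar).sum = ((l.take m).map pyIntChar).sum + pyIntChar x := by
  have h1 : l[m]? = some x := by rw [← List.head?_drop, h]; rfl
  rw [List.take_add_one, h1]
  simp

theorem psum_split (l : List Char) : ∀ (k : Nat),
    ((l.take (2 * k)).map pyIntChar).sum =
      (((everyOther l).take k).map pyIntChar).sum +
      (((everyOther (l.drop 1)).take k).map pyIntChar).sum := by
  induction l using twoStepInd with
  | h0 => intro k; simp [everyOther]
  | h1 a =>
    intro k
    cases k with
    | zero => simp
    | succ k =>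
      have e1 : everyOther [a] = [a] := rfl
      have e2 : everyOther (List.drop 1 [a]) = ([] : List Char) := rfl
      rw [e1, e2,
        List.take_of_length_le (by simp only [List.length_cons, List.length_nil]; omega),
        List.take_of_length_le (by simp only [List.length_cons, List.length_nil]; omega)]
      simp
  | h2 a b r ih =>
    intro k
    cases k with
    | zero => simp
    | succ k =>
      have h2k : 2 * (k + 1) = (2 * k) + 1 + 1 := by ring
      rw [h2k]
      simp only [List.take_succ_cons, everyOther_cons_eq, List.drop_succ_cons,
        List.drop_zero, List.map_cons, List.sum_cons]
      rw [ih k]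
      ring

theorem enumerate_map {α β : Type} (f : α → β) : ∀ (l : List α) (s : Int),
    PySem.List.enumerate (l.map f) s = (PySem.List.enumerate l s).map (fun p => (p.1, f p.2)) := by
  intro l
  induction l with
  | nil => intro s; simp [PySem.List.enumerate_nil]
  | cons x xs ih =>
    intro s
    rw [List.map_cons, PySem.List.enumerate_cons, PySem.List.enumerate_cons, List.map_cons, ih]

theorem blocksFrom_cons (n : Int) (rest : List Int) (s : Int) :
    blocksFrom (n :: rest) s = List.replicate n.toNat s ++ blocksFrom rest (s + 1) := by
  rw [blocksFrom, PySem.List.enumerate_cons, List.flatMap_cons, blocksFrom]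

theorem blocksFrom_nil (s : Int) : blocksFrom [] s = [] := by
  rw [blocksFrom, PySem.List.enumerate_nil, List.flatMap_nil]

theorem blocksB_eq (fs : List Int) : blocksB fs = blocksFrom fs 0 := rfl

theorem explodeA_eq (s : String) : explodeA s = blocksFrom (filesOf s.toList) 0 := by
  rw [explodeA, blocksFrom, filesOf, enumerate_map, List.flatMap_map]

theorem revEnumA_eq (l : List Char) : revEnumA l = (PySem.List.enumerate l 0).reverse := by
  rw [revEnumA, PySem.List.enumerate_eq_map_pyRange (d := ' ')]
  have h1 : PySem.List.pyRange ((l.length : Int) - 1) (-1) (-1) =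
      (PySem.List.pyRange 0 (PySem.List.len l) 1).reverse := by
    rw [PySem.List.pyRange_neg_one_eq_reverse]
    have e1 : (-1 : Int) + 1 = 0 := by norm_num
    have e2 : ((l.length : Int) - 1) + 1 = PySem.List.len l := by
      simp [PySem.List.len]
    rw [e1, e2]
  rw [h1, List.map_reverse]

theorem explodeRevA_eq (s : String) :
    explodeRevA s = (blocksFrom (filesOf s.toList) 0).reverse := by
  rw [explodeRevA, revEnumA_eq, ← explodeA_eq, explodeA, List.reverse_flatMap]
  congr 1
  funext p
  simp

theorem blocksFrom_length : ∀ (fs : List Int) (s : Int),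
    (blocksFrom fs s).length = (fs.map Int.toNat).sum := by
  intro fs
  induction fs with
  | nil => intro s; simp [blocksFrom_nil]
  | cons n rest ih => intro s; simp [blocksFrom_cons, ih]

theorem sum_toNat_of_nonneg : ∀ (fs : List Int), (∀ x ∈ fs, 0 ≤ x) →
    ((fs.map Int.toNat).sum : Int) = fs.sum := by
  intro fs
  induction fs with
  | nil => intro _; simp
  | cons n rest ih =>
    intro h
    have hn := h n (by simp)
    have hrest := ih (fun x hx => h x (by simp [hx]))
    simp only [List.map_cons, List.sum_cons]
    push_cast at hrest ⊢
    omega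

theorem truncA_eq_take (nr : Int) (ex : List Int) (h0 : 0 ≤ nr)
    (h1 : nr ≤ (ex.length : Int)) : truncA nr ex = ex.take nr.toNat := by
  rw [truncA]
  by_cases h : nr < (ex.length : Int)
  · rw [if_pos h]
    have h2 : (ex.length : Int) - ((ex.length : Int) - nr) = nr := by ring
    rw [h2, PySem.List.slice_to ex h0]
  · rw [if_neg h]
    have h2 : nr.toNat = ex.length := by omega
    rw [h2, List.take_length]

theorem rev_take (blocks : List Int) (rc g : Nat) (h : rc + g ≤ blocks.length) :
    (blocks.reverse.drop rc).take g =
      (List.range g).map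
        (fun (j : Nat) => PySem.List.pyGetD blocks ((blocks.length : Int) - 1 - rc - (j : Int)) 0) := by
  apply List.ext_getElem
  · simp; omega
  · intro i h1 h2
    simp only [List.length_take, List.length_drop, List.length_reverse] at h1
    have hi : i < g := by omega
    have hidx : rc + i < blocks.length := by omega
    rw [List.getElem_take, List.getElem_drop, List.getElem_reverse]
    rw [List.getElem_map, List.getElem_range]
    rw [PySem.List.pyGetD_eq_getElem blocks 0 (by omega) (by omega)]
    congr 1
    omega

theorem drop_add_eq {α : Type} (l : List α) (a b : Nat) : l.drop (a + b) = (l.drop a).drop b := by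
  rw [List.drop_drop, Nat.add_comm]

theorem loopA_even (nr : Int) (fwd rev : List Int) (idx : Int) (c : Char)
    (rest : List (Int × Char)) (acc : List Int) (fc rc : Nat) (hpar : idx % 2 = 0) :
    loopA nr fwd rev ((idx, c) :: rest) acc fc rc =
      (if nr ≤ ((acc ++ (fwd.drop fc).take (pyIntChar c).toNat).length : Int) then
        acc ++ (fwd.drop fc).take (pyIntChar c).toNat
      else loopA nr fwd rev rest (acc ++ (fwd.drop fc).take (pyIntChar c).toNat)
        (fc + (pyIntChar c).toNat) rc) := by
  simp [loopA, hpar]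

theorem loopA_odd (nr : Int) (fwd rev : List Int) (idx : Int) (c : Char)
    (rest : List (Int × Char)) (acc : List Int) (fc rc : Nat) (hpar : idx % 2 = 1) :
    loopA nr fwd rev ((idx, c) :: rest) acc fc rc =
      (if nr ≤ ((acc ++ (rev.drop rc).take (pyIntChar c).toNat).length : Int) then
        acc ++ (rev.drop rc).take (pyIntChar c).toNat
      else loopA nr fwd rev rest (acc ++ (rev.drop rc).take (pyIntChar c).toNat)
        fc (rc + (pyIntChar c).toNat)) := by
  simp [loopA, hpar]

-- ----- backFill / noneCount / buildDisk lemmas -----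

theorem length_backFill (blocks : List Int) : ∀ (l : List (Option Int)) (j : Int),
    (backFill blocks l j).length = l.length := by
  intro l
  induction l with
  | nil => intro j; rfl
  | cons o r ih =>
    intro j
    cases o with
    | none => simp [backFill, ih]
    | some x => simp [backFill, ih]

theorem noneCount_append : ∀ (l1 l2 : List (Option Int)),
    noneCount (l1 ++ l2) = noneCount l1 + noneCount l2 := by
  intro l1 l2
  induction l1 with
  | nil => simp [noneCount]
  | cons o r ih =>
    cases o with
    | none => simp [noneCount, ih]; omega
    | some x => simp [noneCount, ih]

theorem noneCount_replicate_some (k : Nat) (x : Int) :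
    noneCount (List.replicate k (some x)) = 0 := by
  induction k with
  | zero => rfl
  | succ k ih => simp [List.replicate_succ, noneCount, ih]

theorem noneCount_replicate_none (k : Nat) :
    noneCount (List.replicate k (none : Option Int)) = k := by
  induction k with
  | zero => rfl
  | succ k ih => simp [List.replicate_succ, noneCount, ih]

theorem backFill_append (blocks : List Int) : ∀ (l1 l2 : List (Option Int)) (j : Int),
    backFill blocks (l1 ++ l2) j =
      backFill blocks l1 j ++ backFill blocks l2 (j - (noneCount l1 : Int)) := by
  intro l1
  induction l1 with
  | nil => intro l2 j; simp [backFill, noneCount]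
  | cons o r ih =>
    intro l2 j
    cases o with
    | some x => simp [backFill, noneCount, ih]
    | none =>
      simp only [List.cons_append, backFill, ih, noneCount]
      rw [show j - ((noneCount r + 1 : Nat) : Int) = j - 1 - (noneCount r : Int) from by
        push_cast; ring]

theorem backFill_replicate_some (blocks : List Int) (x : Int) : ∀ (k : Nat) (j : Int),
    backFill blocks (List.replicate k (some x)) j = List.replicate k x := by
  intro k
  induction k with
  | zero => intro j; rfl
  | succ k ih => intro j; simp [List.replicate_succ, backFill, ih]

theorem backFill_replicate_none (blocks : List Int) : ∀ (k : Nat) (j : Int),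
    backFill blocks (List.replicate k (none : Option Int)) j =
      (List.range k).map (fun (i : Nat) => PySem.List.pyGetD blocks (j - (i : Int)) 0) := by
  intro k
  induction k with
  | zero => intro j; rfl
  | succ k ih =>
    intro j
    rw [List.replicate_succ]
    show PySem.List.pyGetD blocks j 0 ::
        backFill blocks (List.replicate k none) (j - 1) = _
    rw [ih, List.range_succ_eq_map, List.map_cons, List.map_map]
    simp only [Nat.cast_zero, sub_zero]
    congr 1
    apply List.map_congr_left
    intro i _
    simp only [Function.comp_apply]
    congr 1
    push_cast
    ring

theorem take_backFill (blocks : List Int) : ∀ (l : List (Option Int)) (m : Nat) (j : Int),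
    (backFill blocks l j).take m = backFill blocks (l.take m) j := by
  intro l
  induction l with
  | nil => intro m j; simp [backFill]
  | cons o r ih =>
    intro m j
    cases m with
    | zero => simp [backFill]
    | succ m =>
      cases o with
      | some x => simp [backFill, List.take_succ_cons, ih]
      | none => simp [backFill, List.take_succ_cons, ih]

theorem buildDisk_nil (g : List Char) (nr : Int) (fid : Int) (d : List (Option Int)) :
    buildDisk g nr [] fid d = d := rfl

theorem buildDisk_of_ge (g : List Char) (nr : Int) (fs : List Int) (fid : Int)
    (d : List (Option Int)) (h : ¬ (d.length : Int) < nr) :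
    buildDisk g nr fs fid d = d := by
  cases fs with
  | nil => rfl
  | cons n rest => rw [buildDisk, if_neg h]

theorem buildDisk_cons (g : List Char) (nr : Int) (n : Int) (rest : List Int) (fid : Int)
    (d : List (Option Int)) (h : (d.length : Int) < nr) :
    buildDisk g nr (n :: rest) fid d =
      (if ((d ++ List.replicate n.toNat (some fid)).length : Int) < nr then
        buildDisk g nr rest (fid + 1)
          ((d ++ List.replicate n.toNat (some fid)) ++
            List.replicate (pyIntChar (PySem.List.pyGetD g fid ' ')).toNat none)
      else buildDisk g nr rest (fid + 1) (d ++ List.replicate n.toNat (some fid))) := by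
  rw [buildDisk, if_pos h]

theorem psum_split' (cs : List Char) (k : Nat) :
    psumP cs (2 * k) = ((filesOf cs).take k).sum + osumP cs k := by
  have h := psum_split cs k
  simpa [psumP, osumP, gsP, filesOf, List.map_take] using h

-- main loop correspondence: A's fused loop (with its final truncation) produces exactly
-- B's back-filled placeholder disk
theorem loop_eq (cs : List Char) (nr : Int) (blocks : List Int)
    (hnr : nr = (filesOf cs).sum)
    (hblen : (blocks.length : Int) = nr)
    (hd : ∀ c ∈ everyOther cs, 48 ≤ c.toNat ∧ c.toNat ≤ 57)
    (h2 : ∀ fid, fid < (gsP cs).length →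
      (∀ j, j < 2 * fid + 1 → psumP cs (j + 1) < nr) →
      (48 ≤ ((gsP cs).getD fid ' ').toNat ∧ ((gsP cs).getD fid ' ').toNat ≤ 57) ∧
        osumP cs (fid + 1) ≤ nr) :
    ∀ (t : List Char), ∀ (fid : Nat) (dAcc : List (Option Int)) (fc rc : Nat),
      cs.drop (2 * fid) = t →
      blocks.drop fc = blocksFrom ((filesOf cs).drop fid) (fid : Int) →
      (rc : Int) = osumP cs fid →
      noneCount dAcc = rc →
      (dAcc.length : Int) = psumP cs (2 * fid) →
      (∀ j, j < 2 * fid → psumP cs (j + 1) < nr) →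
      (dAcc.length : Int) < nr →
      truncA nr (loopA nr blocks blocks.reverse
          (PySem.List.enumerate t (2 * (fid : Int))) (backFill blocks dAcc (nr - 1)) fc rc)
        = backFill blocks
            ((buildDisk (gsP cs) nr ((filesOf cs).drop fid) (fid : Int) dAcc).take nr.toNat)
            (nr - 1) := by
  refine twoStepInd ?_ ?_ ?_
  · -- t = []: both passes are done
    intro fid dAcc fc rc ht hfwd hrcv hnc hlenv hreach hlive
    have hfiles : (filesOf cs).drop fid = [] := by
      rw [filesOf_drop, ht]; rfl
    rw [PySem.List.enumerate_nil, hfiles, buildDisk_nil]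
    show truncA nr (backFill blocks dAcc (nr - 1)) = _
    rw [truncA, if_neg (by rw [length_backFill]; omega)]
    rw [List.take_of_length_le (by omega)]
  · -- t = [c]: a final file segment; the break necessarily fires
    intro c fid dAcc fc rc ht hfwd hrcv hnc hlenv hreach hlive
    have hEO : (everyOther cs).drop fid = [c] := by rw [← everyOther_drop, ht]; rfl
    obtain ⟨hc48, hc57⟩ := hd c (List.mem_of_mem_drop (i := fid)
      (by rw [hEO]; exact List.mem_cons_self))
    have hpyc0 : 0 ≤ pyIntChar c := by unfold pyIntChar; omega
    have hfiles : (filesOf cs).drop fid = [pyIntChar c] := by rw [filesOf_drop, ht]; rfl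
    have hnr2 : nr = ((filesOf cs).take fid).sum + pyIntChar c := by
      conv_lhs => rw [hnr, ← List.take_append_drop fid (filesOf cs)]
      rw [List.sum_append, hfiles]; simp
    have hsplit := psum_split' cs fid
    have hosum0 : 0 ≤ osumP cs fid := by omega
    have hseg : (blocks.drop fc).take (pyIntChar c).toNat
        = List.replicate (pyIntChar c).toNat ((fid : Nat) : Int) := by
      rw [hfwd, hfiles, blocksFrom_cons, blocksFrom_nil, List.append_nil,
        List.take_replicate, min_self]
    rw [PySem.List.enumerate_cons, PySem.List.enumerate_nil]
    rw [loopA_even nr blocks blocks.reverse _ c [] _ fc rc (by omega)]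
    rw [hseg]
    have hacc1 : backFill blocks dAcc (nr - 1) ++ List.replicate (pyIntChar c).toNat ((fid : Nat) : Int)
        = backFill blocks (dAcc ++ List.replicate (pyIntChar c).toNat (some ((fid : Nat) : Int))) (nr - 1) := by
      rw [backFill_append, backFill_replicate_some]
    have hlen1 : ((dAcc ++ List.replicate (pyIntChar c).toNat (some ((fid : Nat) : Int))).length : Int)
        = psumP cs (2 * fid) + pyIntChar c := by
      rw [List.length_append, List.length_replicate]; push_cast; omega
    have hbr : nr ≤ psumP cs (2 * fid) + pyIntChar c := by omega
    rw [hacc1]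
    rw [if_pos (by rw [length_backFill]; omega)]
    rw [truncA_eq_take nr _ (by omega) (by rw [length_backFill]; omega)]
    rw [take_backFill]
    rw [hfiles, buildDisk_cons _ _ _ _ _ _ hlive]
    rw [if_neg (by omega), buildDisk_nil]
  · -- t = c :: d :: r: a file segment then a gap segment
    intro c d r ih fid dAcc fc rc ht hfwd hrcv hnc hlenv hreach hlive
    have hEO : (everyOther cs).drop fid = c :: everyOther r := by
      rw [← everyOther_drop, ht]; rfl
    obtain ⟨hc48, hc57⟩ := hd c (List.mem_of_mem_drop (i := fid)
      (by rw [hEO]; exact List.mem_cons_self))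
    have hpyc0 : 0 ≤ pyIntChar c := by unfold pyIntChar; omega
    have hfiles : (filesOf cs).drop fid = pyIntChar c :: (everyOther r).map pyIntChar := by
      rw [filesOf_drop, ht]; rfl
    have hdrop1 : cs.drop (2 * fid + 1) = d :: r := by
      have h := congrArg (List.drop 1) ht
      rw [List.drop_drop] at h
      simpa using h
    have hr2 : cs.drop (2 * (fid + 1)) = r := by
      have h := congrArg (List.drop 2) ht
      rw [List.drop_drop] at h
      rw [show 2 * (fid + 1) = 2 * fid + 2 from by ring]
      simpa using h
    have hfilesSucc : (filesOf cs).drop (fid + 1) = (everyOther r).map pyIntChar := by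
      rw [filesOf_drop, hr2]
    have hp1 : psumP cs (2 * fid + 1) = psumP cs (2 * fid) + pyIntChar c :=
      sum_take_succ cs (2 * fid) c _ ht
    have hseg1 : (blocks.drop fc).take (pyIntChar c).toNat
        = List.replicate (pyIntChar c).toNat ((fid : Nat) : Int) := by
      rw [hfwd, hfiles, blocksFrom_cons]
      exact List.take_left' (by simp)
    rw [PySem.List.enumerate_cons]
    rw [loopA_even nr blocks blocks.reverse _ c _ _ fc rc (by omega)]
    rw [hseg1]
    have hacc1 : backFill blocks dAcc (nr - 1) ++ List.replicate (pyIntChar c).toNat ((fid : Nat) : Int)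
        = backFill blocks (dAcc ++ List.replicate (pyIntChar c).toNat (some ((fid : Nat) : Int))) (nr - 1) := by
      rw [backFill_append, backFill_replicate_some]
    have hlen1 : ((dAcc ++ List.replicate (pyIntChar c).toNat (some ((fid : Nat) : Int))).length : Int)
        = psumP cs (2 * fid) + pyIntChar c := by
      rw [List.length_append, List.length_replicate]; push_cast; omega
    rw [hacc1]
    rw [hfiles, buildDisk_cons _ _ _ _ _ _ hlive]
    by_cases hbr1 : nr ≤ psumP cs (2 * fid) + pyIntChar c
    · -- the break fires on the file segment
      rw [if_pos (by rw [length_backFill]; omega)]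
      rw [truncA_eq_take nr _ (by omega) (by rw [length_backFill]; omega)]
      rw [take_backFill]
      rw [if_neg (by omega)]
      rw [buildDisk_of_ge _ _ _ _ _ (by omega)]
    · -- the loop reaches the gap character
      rw [not_le] at hbr1
      rw [if_neg (by rw [length_backFill]; omega)]
      rw [if_pos (by omega)]
      rw [PySem.List.enumerate_cons]
      rw [loopA_odd nr blocks blocks.reverse _ d _ _ _ rc (by omega)]
      have hreach1 : ∀ j, j < 2 * fid + 1 → psumP cs (j + 1) < nr := by
        intro j hj
        by_cases hj2 : j < 2 * fid
        · exact hreach j hj2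
        · have hje : j = 2 * fid := by omega
          rw [hje, hp1]; omega
      have hgdrop : (gsP cs).drop fid = d :: everyOther (r.drop 1) := by
        rw [gsP_drop, hdrop1, everyOther_cons_eq]
      have hfidlt : fid < (gsP cs).length := lt_length_of_drop hgdrop
      have hgd : (gsP cs).getD fid ' ' = d := getD_of_drop ' ' hgdrop
      obtain ⟨hdig, hosum⟩ := h2 fid hfidlt hreach1
      rw [hgd] at hdig
      obtain ⟨hd48, hd57⟩ := hdig
      have hpyd0 : 0 ≤ pyIntChar d := by unfold pyIntChar; omega
      have hosucc : osumP cs (fid + 1) = osumP cs fid + pyIntChar d :=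
        sum_take_succ (gsP cs) fid d _ hgdrop
      have hrevseg := rev_take blocks rc (pyIntChar d).toNat (by omega)
      rw [hblen] at hrevseg
      have hpygetd : PySem.List.pyGetD (gsP cs) ((fid : Nat) : Int) ' ' = d := by
        rw [PySem.List.pyGetD_of_nonneg (gsP cs) ' ' (by omega)]
        rw [show ((fid : Nat) : Int).toNat = fid from by omega]
        exact hgd
      rw [hpygetd]
      have hacc2 : backFill blocks (dAcc ++ List.replicate (pyIntChar c).toNat (some ((fid : Nat) : Int))) (nr - 1)
            ++ (blocks.reverse.drop rc).take (pyIntChar d).toNat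
          = backFill blocks
              ((dAcc ++ List.replicate (pyIntChar c).toNat (some ((fid : Nat) : Int)))
                ++ List.replicate (pyIntChar d).toNat none) (nr - 1) := by
        rw [backFill_append (l2 := List.replicate (pyIntChar d).toNat none),
          backFill_replicate_none, hrevseg]
        congr 1
        apply List.map_congr_left
        intro i _
        congr 1
        rw [noneCount_append, hnc, noneCount_replicate_some]
        push_cast
        ring
      rw [hacc2]
      have hlen2 : (((dAcc ++ List.replicate (pyIntChar c).toNat (some ((fid : Nat) : Int)))
            ++ List.replicate (pyIntChar d).toNat none).length : Int)
          = psumP cs (2 * fid) + pyIntChar c + pyIntChar d := by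
        rw [List.length_append, List.length_append, List.length_replicate, List.length_replicate]
        push_cast; omega
      by_cases hbr2 : nr ≤ psumP cs (2 * fid) + pyIntChar c + pyIntChar d
      · -- the break fires on the gap segment
        rw [if_pos (by rw [length_backFill]; omega)]
        rw [truncA_eq_take nr _ (by omega) (by rw [length_backFill]; omega)]
        rw [take_backFill]
        rw [buildDisk_of_ge _ _ _ _ _ (by omega)]
      · -- no break: one full round done, recurse
        rw [if_neg (by rw [length_backFill]; omega)]
        have hp2 : psumP cs (2 * fid + 1 + 1) = psumP cs (2 * fid + 1) + pyIntChar d :=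
          sum_take_succ cs (2 * fid + 1) d _ hdrop1
        have hfwd' : blocks.drop (fc + (pyIntChar c).toNat)
            = blocksFrom ((filesOf cs).drop (fid + 1)) ((fid + 1 : Nat) : Int) := by
          rw [drop_add_eq, hfwd, hfiles, blocksFrom_cons, List.drop_left' (by simp),
            hfilesSucc]
          push_cast; rfl
        have hrc' : ((rc + (pyIntChar d).toNat : Nat) : Int) = osumP cs (fid + 1) := by
          rw [hosucc]; push_cast; omega
        have hnc' : noneCount ((dAcc ++ List.replicate (pyIntChar c).toNat (some ((fid : Nat) : Int)))
            ++ List.replicate (pyIntChar d).toNat none) = rc + (pyIntChar d).toNat := by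
          rw [noneCount_append, noneCount_append, hnc, noneCount_replicate_some,
            noneCount_replicate_none]
          omega
        have hlen' : (((dAcc ++ List.replicate (pyIntChar c).toNat (some ((fid : Nat) : Int)))
            ++ List.replicate (pyIntChar d).toNat none).length : Int)
            = psumP cs (2 * (fid + 1)) := by
          rw [hlen2, show 2 * (fid + 1) = 2 * fid + 1 + 1 from by ring, hp2, hp1]
        have hreach' : ∀ j, j < 2 * (fid + 1) → psumP cs (j + 1) < nr := by
          intro j hj
          by_cases hj2 : j < 2 * fid + 1
          · exact hreach1 j hj2
          · have hje : j = 2 * fid + 1 := by omega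
            rw [hje, hp2, hp1]; omega
        have hlive' : (((dAcc ++ List.replicate (pyIntChar c).toNat (some ((fid : Nat) : Int)))
            ++ List.replicate (pyIntChar d).toNat none).length : Int) < nr := by
          rw [hlen2]; omega
        have ih' := ih (fid + 1)
          ((dAcc ++ List.replicate (pyIntChar c).toNat (some ((fid : Nat) : Int)))
            ++ List.replicate (pyIntChar d).toNat none)
          (fc + (pyIntChar c).toNat) (rc + (pyIntChar d).toNat)
          hr2 hfwd' hrc' hnc' hlen' hreach' hlive'
        rw [hfilesSucc] at ih'
        rw [show (2 * ((fid + 1 : Nat) : Int)) = 2 * (fid : Int) + 1 + 1 from by push_cast; ring] at ih'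
        rw [show ((fid + 1 : Nat) : Int) = (fid : Int) + 1 from by push_cast; ring] at ih'
        exact ih'

theorem everyOther_length {α : Type} : ∀ (l : List α), (everyOther l).length = (l.length + 1) / 2 := by
  refine twoStepInd ?_ ?_ ?_
  · simp [everyOther]
  · intro a; simp [everyOther]
  · intro a b r ih
    simp only [everyOther, List.length_cons, ih]
    omega

theorem everyOther_getD {α : Type} : ∀ (l : List α) (i : Nat) (d : α),
    (everyOther l).getD i d = l.getD (2 * i) d := by
  refine twoStepInd ?_ ?_ ?_
  · intro i d; rfl
  · intro a i d
    cases i with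
    | zero => rfl
    | succ i =>
      rw [show 2 * (i + 1) = 2 * i + 1 + 1 from by ring]
      simp [everyOther, List.getD]
  · intro a b r ih i d
    cases i with
    | zero => rfl
    | succ i =>
      rw [show 2 * (i + 1) = 2 * i + 1 + 1 from by ring]
      simp only [everyOther, List.getD_cons_succ]
      exact ih i d

theorem range_map_getD {α : Type} (l : List α) (d : α) (m : Nat) (hm : m ≤ l.length) :
    (List.range m).map (fun k => l.getD k d) = l.take m := by
  apply List.ext_getElem
  · simp; omega
  · intro i h1 h2
    simp only [List.getElem_map, List.getElem_range, List.getElem_take]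
    rw [List.getD_eq_getElem l d (by simp at h1; omega)]

theorem gsP_getD (cs : List Char) (fid : Nat) :
    (gsP cs).getD fid ' ' = cs.getD (2 * fid + 1) ' ' := by
  rw [gsP, everyOther_getD]
  cases cs with
  | nil => rfl
  | cons x xs => simp

theorem gsP_length (cs : List Char) : (gsP cs).length = cs.length / 2 := by
  rw [gsP, everyOther_length, List.length_drop]; omega

theorem nrP_eq (cs : List Char) : nrP cs = (filesOf cs).sum := by
  rw [nrP, filesOf]
  have h1 : (fun k => pyIntChar (cs.getD (2 * k) ' '))
      = (fun k => pyIntChar ((everyOther cs).getD k ' ')) := by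
    funext k; rw [everyOther_getD]
  rw [h1, ← everyOther_length,
    show (fun k => pyIntChar ((everyOther cs).getD k ' '))
      = pyIntChar ∘ (fun k => (everyOther cs).getD k ' ') from rfl,
    ← List.map_map, range_map_getD _ _ _ (le_refl _), List.take_length]

theorem osumRP_eq (cs : List Char) (m : Nat) (hm : m ≤ (gsP cs).length) :
    osumRP cs m = osumP cs m := by
  rw [osumRP, osumP]
  have h1 : (fun k => pyIntChar (cs.getD (2 * k + 1) ' '))
      = (fun k => pyIntChar ((gsP cs).getD k ' ')) := by
    funext k; rw [gsP_getD]
  rw [h1,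
    show (fun k => pyIntChar ((gsP cs).getD k ' '))
      = pyIntChar ∘ (fun k => (gsP cs).getD k ' ') from rfl,
    ← List.map_map, range_map_getD _ _ _ hm]

-- ===== VERDICT (by name: the statement is the Claim_ definition above) =====
theorem create_filled_list_spec : Claim_equal_create_filled_list := by
  intro s _ hPre
  unfold Pre_create_filled_list at hPre
  obtain ⟨h1, h2n⟩ := hPre
  rw [nrP_eq] at h2n
  have hd : ∀ c ∈ everyOther s.toList, 48 ≤ c.toNat ∧ c.toNat ≤ 57 :=
    ball_of_getD (P := fun c => 48 ≤ c.toNat ∧ c.toNat ≤ 57) ' ' (by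
      intro i hi
      rw [everyOther_getD]
      exact h1 (2 * i) (by rw [everyOther_length] at hi; omega) (by omega))
  have h2 : ∀ fid, fid < (gsP s.toList).length →
      (∀ j, j < 2 * fid + 1 → psumP s.toList (j + 1) < (filesOf s.toList).sum) →
      (48 ≤ ((gsP s.toList).getD fid ' ').toNat ∧ ((gsP s.toList).getD fid ' ').toNat ≤ 57) ∧
        osumP s.toList (fid + 1) ≤ (filesOf s.toList).sum := by
    intro fid hflt hguard
    have hflt2 : fid < s.toList.length / 2 := by rw [gsP_length] at hflt; exact hflt
    obtain ⟨hdig, hos⟩ := h2n fid hflt2 hguard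
    refine ⟨by rw [gsP_getD]; exact hdig, ?_⟩
    rw [← osumRP_eq s.toList (fid + 1) (by omega)]
    exact hos
  show create_filled_list s = create_filled_list_alt s
  have key : create_filled_list s
      = truncA (filesOf s.toList).sum
          (loopA (filesOf s.toList).sum (explodeA s) (explodeRevA s)
            (PySem.List.enumerate s.toList 0) [] 0 0) := rfl
  have keyB : create_filled_list_alt s
      = backFill (blocksB (filesOf s.toList))
          ((buildDisk (gsP s.toList) (filesOf s.toList).sum (filesOf s.toList) 0 []).take
            (filesOf s.toList).sum.toNat)
          ((filesOf s.toList).sum - 1) := rfl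
  rw [key, keyB, explodeA_eq, explodeRevA_eq, blocksB_eq]
  have hfnn : ∀ x ∈ filesOf s.toList, 0 ≤ x := by
    intro x hx
    obtain ⟨c, hc, rfl⟩ := List.mem_map.mp hx
    have hb := hd c hc
    unfold pyIntChar; omega
  have h0nr : 0 ≤ (filesOf s.toList).sum := List.sum_nonneg hfnn
  have hblen : ((blocksFrom (filesOf s.toList) 0).length : Int) = (filesOf s.toList).sum := by
    rw [blocksFrom_length]
    exact sum_toNat_of_nonneg _ hfnn
  by_cases hpos : 0 < (filesOf s.toList).sum
  · have main := loop_eq s.toList (filesOf s.toList).sum (blocksFrom (filesOf s.toList) 0)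
      rfl hblen hd h2 s.toList 0 [] 0 0 (by simp) (by simp) (by simp [osumP])
      (by simp [noneCount]) (by simp [psumP]) (by omega) (by simpa using hpos)
    simpa [backFill] using main
  · have hz : (filesOf s.toList).sum = 0 := by omega
    have hbe : blocksFrom (filesOf s.toList) 0 = [] := by
      have hl : (blocksFrom (filesOf s.toList) 0).length = 0 := by omega
      exact List.eq_nil_of_length_eq_zero hl
    rw [hbe, hz]
    have hA : loopA 0 [] ([] : List Int).reverse (PySem.List.enumerate s.toList 0) [] 0 0 = [] := by
      cases hcs : s.toList with
      | nil => rw [PySem.List.enumerate_nil]; rfl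
      | cons c rest =>
        rw [PySem.List.enumerate_cons]
        rw [loopA_even 0 [] ([] : List Int).reverse 0 c _ [] 0 0 (by omega)]
        simp
    rw [hA]
    rw [truncA, if_neg (by simp)]
    rw [buildDisk_of_ge _ _ _ _ _ (by simp)]
    simp [backFill]
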